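-- pv_equiv track=rewrite | github.com/wookingwoo/programmers-algorithm | 03_Heap/01_더 맵게.py | solution
-- ===== SOURCE A (Python) =====
-- import heapq
--
-- def solution(scoville, K):
--     heapq.heapify(scoville)
--     n = 0
--
--     while (True):
--         if len(scoville) == 1 and scoville[0] < K:
--             return -1
--
--         m1 = heapq.heappop(scoville)
--
--         if m1 >= K:
--             return n
--         else:
--             m2 = heapq.heappop(scoville)
--             heapq.heappush(scoville, m1 + (m2 * 2))
--             n += 1
-- ===== SOURCE B (Python) =====
-- def _two_min(xs):
--     # one linear scan for the two smallest values (m1 <= m2)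
--     m1 = m2 = None
--     for v in xs:
--         if m1 is None or v < m1:
--             m1, m2 = v, m1
--         elif m2 is None or v < m2:
--             m2 = v
--     return m1, m2
--
--
-- def solution(scoville, K):
--     xs = list(scoville)
--     n = 0
--     while True:
--         m1, m2 = _two_min(xs)
--         if m1 >= K:
--             return n
--         if m2 is None:
--             return -1
--         xs.remove(m1)
--         xs.remove(m2)
--         xs.append(m1 + 2 * m2)
--         n += 1
-- ===== Notes on version B (the rewrite author's own statement) =====
-- stated objective: simpler
-- what changed: Replaced the heapq binary-heap priority queue with a plain list and one linear scan per round that finds the two smallest values, which are then removed and replaced by m1 + 2*m2.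
-- outside the precondition, e.g. on solution([], 7): A raises IndexError, B raises TypeError
import Mathlib
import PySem

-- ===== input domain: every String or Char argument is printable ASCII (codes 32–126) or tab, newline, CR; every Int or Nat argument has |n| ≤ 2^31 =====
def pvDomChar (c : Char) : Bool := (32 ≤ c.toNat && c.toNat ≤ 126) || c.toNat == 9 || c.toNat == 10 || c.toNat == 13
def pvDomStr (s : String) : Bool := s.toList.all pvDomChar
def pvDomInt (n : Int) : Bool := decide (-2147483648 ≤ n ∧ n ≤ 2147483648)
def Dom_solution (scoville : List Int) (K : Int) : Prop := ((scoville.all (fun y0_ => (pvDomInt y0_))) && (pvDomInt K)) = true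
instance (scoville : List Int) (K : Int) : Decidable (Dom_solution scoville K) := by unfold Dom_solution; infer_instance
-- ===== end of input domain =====

-- B replaces A's heapq priority queue by a plain list with one linear scan for the two
-- smallest values per round (objective: simpler, not faster). A heapifies the caller's
-- list in place while B works on a copy; the equivalence proved is about the RETURN value.

-- ===== PORT A =====
-- heapq.heappop is modeled by its observable contract (it removes and returns the
-- smallest element; ties between equal Int values are indistinguishable), and heapify by
-- the identity: the heap's internal array layout is never observed in A's return value —
-- the list is read only through heappop and, at length 1, at index 0, where the unique
-- element is the root. Exact: A's return value depends only on the multiset of elements.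
def pyHeapPop (h : List Int) : Option (Int × List Int) :=
  match h.min? with
  | none => none
  | some m => some (m, h.erase m)

-- termination helper for solutionLoop (cited by its decreasing_by)
theorem pyHeapPop_dec {h h1 h2 : List Int} {m1 m2 c : Int}
    (hp : pyHeapPop h = some (m1, h1)) (hq : pyHeapPop h1 = some (m2, h2)) :
    (h2 ++ [c]).length < h.length := by
  rw [pyHeapPop] at hp hq
  rcases e1 : h.min? with _ | n1
  · simp [e1] at hp
  rcases e2 : h1.min? with _ | n2
  · simp [e2] at hq
  simp only [e1, Option.some.injEq, Prod.mk.injEq] at hp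
  simp only [e2, Option.some.injEq, Prod.mk.injEq] at hq
  obtain ⟨rfl, rfl⟩ := hp
  obtain ⟨rfl, rfl⟩ := hq
  have hm1 : n1 ∈ h := (List.min?_eq_some_iff.mp e1).1
  have hm2 : n2 ∈ h.erase n1 := (List.min?_eq_some_iff.mp e2).1
  have l1 := List.length_erase_of_mem hm1
  have l2 := List.length_erase_of_mem hm2
  have p1 : 1 ≤ (h.erase n1).length := List.length_pos_of_mem hm2
  simp only [List.length_append, List.length_cons, List.length_nil]
  omega

-- the while-True loop of A; the unreachable `none` arms return -1 (Python raises IndexError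
-- only on an empty heap, which Pre_ excludes)
def solutionLoop (h : List Int) (K n : Int) : Int :=
  if h.length = 1 ∧ h.head! < K then -1
  else
    match hp : pyHeapPop h with
    | none => -1
    | some (m1, h1) =>
      if m1 ≥ K then n
      else
        match hq : pyHeapPop h1 with
        | none => -1
        | some (m2, h2) => solutionLoop (h2 ++ [m1 + 2 * m2]) K (n + 1)
termination_by h.length
decreasing_by exact pyHeapPop_dec hp hq

def solution (scoville : List Int) (K : Int) : Int :=
  solutionLoop scoville K 0

-- ===== PORT B =====
-- one linear scan for the two smallest values (m1 <= m2), as in Source B's _two_min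
def twoMinStep (p : Option Int × Option Int) (v : Int) : Option Int × Option Int :=
  match p with
  | (none, _) => (some v, none)
  | (some a, m2) =>
    if v < a then (some v, some a)
    else
      match m2 with
      | none => (some a, some v)
      | some b => if v < b then (some a, some v) else (some a, some b)

def twoMin (xs : List Int) : Option Int × Option Int :=
  xs.foldl twoMinStep (none, none)

-- scan invariant, needed by solutionAltLoop's termination proof (cited in decreasing_by)
theorem twoMin_go (xs : List Int) : ∀ (a b : Int), a ≤ b →
    ∃ (u v : Int) (rest : Multiset Int),
      xs.foldl twoMinStep (some a, some b) = (some u, some v) ∧ u ≤ v ∧ u ≤ a ∧ v ≤ b ∧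
      (a ::ₘ b ::ₘ (↑xs : Multiset Int)) = u ::ₘ v ::ₘ rest ∧ ∀ r ∈ rest, v ≤ r := by
  induction xs with
  | nil =>
    intro a b hab
    exact ⟨a, b, 0, rfl, hab, le_refl a, le_refl b, rfl, by simp⟩
  | cons x xs ih =>
    intro a b hab
    simp only [List.foldl_cons]
    by_cases hxa : x < a
    · obtain ⟨u, v, rest, hf, huv, hua, hvb, hm, hr⟩ := ih x a (le_of_lt hxa)
      refine ⟨u, v, b ::ₘ rest, ?_, huv, le_trans hua (le_of_lt hxa), le_trans hvb hab, ?_, ?_⟩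
      · simpa [twoMinStep, hxa] using hf
      · have hc := fun c => congrArg (Multiset.count c) hm
        ext c
        have := hc c
        simp only [← Multiset.cons_coe, Multiset.count_cons] at this ⊢
        omega
      · intro r hrm
        rcases Multiset.mem_cons.mp hrm with h1 | h1
        · exact h1 ▸ le_trans hvb hab
        · exact hr r h1
    · by_cases hxb : x < b
      · obtain ⟨u, v, rest, hf, huv, hua, hvb, hm, hr⟩ := ih a x (not_lt.mp hxa)
        refine ⟨u, v, b ::ₘ rest, ?_, huv, hua, le_trans hvb (le_of_lt hxb), ?_, ?_⟩
        · simpa [twoMinStep, hxa, hxb] using hf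
        · have hc := fun c => congrArg (Multiset.count c) hm
          ext c
          have := hc c
          simp only [← Multiset.cons_coe, Multiset.count_cons] at this ⊢
          omega
        · intro r hrm
          rcases Multiset.mem_cons.mp hrm with h1 | h1
          · exact h1 ▸ le_trans hvb (le_of_lt hxb)
          · exact hr r h1
      · obtain ⟨u, v, rest, hf, huv, hua, hvb, hm, hr⟩ := ih a b hab
        refine ⟨u, v, x ::ₘ rest, ?_, huv, hua, hvb, ?_, ?_⟩
        · simpa [twoMinStep, hxa, hxb] using hf
        · have hc := fun c => congrArg (Multiset.count c) hm
          ext c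
          have := hc c
          simp only [← Multiset.cons_coe, Multiset.count_cons] at this ⊢
          omega
        · intro r hrm
          rcases Multiset.mem_cons.mp hrm with h1 | h1
          · exact h1 ▸ le_trans hvb (not_lt.mp hxb)
          · exact hr r h1

theorem twoMin_some2 {xs : List Int} {m1 m2 : Int} (h : twoMin xs = (some m1, some m2)) :
    m1 ≤ m2 ∧ ∃ rest : Multiset Int,
      (↑xs : Multiset Int) = m1 ::ₘ m2 ::ₘ rest ∧ ∀ r ∈ rest, m2 ≤ r := by
  match xs with
  | [] => simp [twoMin] at h
  | [x] => simp [twoMin, twoMinStep] at h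
  | x :: y :: ys =>
    rw [twoMin, List.foldl_cons, List.foldl_cons] at h
    by_cases hyx : y < x
    · have hstep : twoMinStep (twoMinStep (none, none) x) y = (some y, some x) := by
        simp [twoMinStep, hyx]
      rw [hstep] at h
      obtain ⟨u, v, rest, hf, huv, hua, hvb, hm, hr⟩ := twoMin_go ys y x (le_of_lt hyx)
      rw [hf] at h
      simp only [Prod.mk.injEq, Option.some.injEq] at h
      obtain ⟨rfl, rfl⟩ := h
      refine ⟨huv, rest, ?_, hr⟩
      have hc := fun c => congrArg (Multiset.count c) hm
      ext c
      have := hc c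
      simp only [← Multiset.cons_coe, Multiset.count_cons] at this ⊢
      omega
    · have hstep : twoMinStep (twoMinStep (none, none) x) y = (some x, some y) := by
        simp [twoMinStep, hyx]
      rw [hstep] at h
      obtain ⟨u, v, rest, hf, huv, hua, hvb, hm, hr⟩ := twoMin_go ys x y (not_lt.mp hyx)
      rw [hf] at h
      simp only [Prod.mk.injEq, Option.some.injEq] at h
      obtain ⟨rfl, rfl⟩ := h
      refine ⟨huv, rest, ?_, hr⟩
      have hc := fun c => congrArg (Multiset.count c) hm
      ext c
      have := hc c
      simp only [← Multiset.cons_coe, Multiset.count_cons] at this ⊢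
      omega

theorem twoMin_dec {xs : List Int} {m1 m2 : Int} (h : twoMin xs = (some m1, some m2)) :
    ((xs.erase m1).erase m2 ++ [m1 + 2 * m2]).length < xs.length := by
  obtain ⟨-, rest, hm, -⟩ := twoMin_some2 h
  have h1 : ((↑xs : Multiset Int).erase m1) = m2 ::ₘ rest := by
    rw [hm, Multiset.erase_cons_head]
  rw [Multiset.coe_erase] at h1
  have h2 : ((↑(xs.erase m1) : Multiset Int).erase m2) = rest := by
    rw [h1, Multiset.erase_cons_head]
  rw [Multiset.coe_erase] at h2
  have c0 := congrArg Multiset.card hm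
  have c1 := congrArg Multiset.card h1
  have c2 := congrArg Multiset.card h2
  simp only [Multiset.coe_card, Multiset.card_cons] at c0 c1 c2
  simp only [List.length_append, List.length_cons, List.length_nil]
  omega

-- B's while-True loop; the (none, _) arm is Python B's TypeError on the empty list (excluded by Pre_)
def solutionAltLoop (xs : List Int) (K n : Int) : Int :=
  match hm : twoMin xs with
  | (none, _) => -1
  | (some m1, none) => if m1 ≥ K then n else -1
  | (some m1, some m2) =>
    if m1 ≥ K then n
    else solutionAltLoop ((xs.erase m1).erase m2 ++ [m1 + 2 * m2]) K (n + 1)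
termination_by xs.length
decreasing_by exact twoMin_dec hm

def solution_alt (scoville : List Int) (K : Int) : Int :=
  solutionAltLoop scoville K 0

-- ===== PRECONDITION & SPEC =====
-- Pre_ excludes only the empty list, on which Python A raises IndexError (and Python B raises TypeError).
def Pre_solution (scoville : List Int) (K : Int) : Prop := scoville ≠ []
instance (scoville : List Int) (K : Int) : Decidable (Pre_solution scoville K) := by
  unfold Pre_solution; infer_instance

def pvWitness_solution : List Int × Int := ([1, 2, 3, 9, 10, 12], 7)

def Spec_solution (scoville : List Int) (K : Int) (out : Int) : Prop := out = solution_alt scoville K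
instance (scoville : List Int) (K : Int) (out : Int) : Decidable (Spec_solution scoville K out) := by
  unfold Spec_solution; infer_instance

-- ===== CLAIM (what is proved, stated in full; the proofs are below) =====
def Claim_equal_solution : Prop := ∀ (scoville : List Int) (K : Int), Dom_solution scoville K → Pre_solution scoville K → Spec_solution scoville K (solution scoville K)

-- ===== LEMMAS AND PROOFS =====
theorem twoMin_cases (xs : List Int) :
    (xs = [] ∧ twoMin xs = (none, none)) ∨
    (∃ a, xs = [a] ∧ twoMin xs = (some a, none)) ∨
    (∃ m1 m2, twoMin xs = (some m1, some m2)) := by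
  match xs with
  | [] => exact Or.inl ⟨rfl, rfl⟩
  | [x] => exact Or.inr (Or.inl ⟨x, rfl, by simp [twoMin, twoMinStep]⟩)
  | x :: y :: ys =>
    refine Or.inr (Or.inr ?_)
    rw [twoMin, List.foldl_cons, List.foldl_cons]
    by_cases hyx : y < x
    · have hstep : twoMinStep (twoMinStep (none, none) x) y = (some y, some x) := by
        simp [twoMinStep, hyx]
      rw [hstep]
      obtain ⟨u, v, rest, hf, -⟩ := twoMin_go ys y x (le_of_lt hyx)
      exact ⟨u, v, hf⟩
    · have hstep : twoMinStep (twoMinStep (none, none) x) y = (some x, some y) := by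
        simp [twoMinStep, hyx]
      rw [hstep]
      obtain ⟨u, v, rest, hf, -⟩ := twoMin_go ys x y (not_lt.mp hyx)
      exact ⟨u, v, hf⟩

theorem min?_of_multiset {h : List Int} {m1 : Int} {t : Multiset Int}
    (hm : (↑h : Multiset Int) = m1 ::ₘ t) (hle : ∀ r ∈ t, m1 ≤ r) : h.min? = some m1 := by
  apply List.min?_eq_some_iff.mpr
  refine ⟨?_, ?_⟩
  · rw [← Multiset.mem_coe, hm]; exact Multiset.mem_cons_self ..
  · intro b hb
    have hbm : b ∈ (↑h : Multiset Int) := Multiset.mem_coe.mpr hb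
    rw [hm] at hbm
    rcases Multiset.mem_cons.mp hbm with h1 | h1
    · exact le_of_eq h1.symm
    · exact hle b h1

theorem loopA_nil (K n : Int) : solutionLoop [] K n = -1 := by
  rw [solutionLoop]; simp [pyHeapPop]

theorem loopB_nil (K n : Int) : solutionAltLoop [] K n = -1 := by
  simp [solutionAltLoop, twoMin]

theorem loopA_single (a K n : Int) : solutionLoop [a] K n = if a < K then -1 else n := by
  rw [solutionLoop]
  by_cases hK : a < K
  · simp [hK]
  · simp [hK, pyHeapPop, List.min?, not_lt.mp hK]

theorem loopB_single (a K n : Int) : solutionAltLoop [a] K n = if a < K then -1 else n := by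
  have h2 : twoMin [a] = (some a, none) := by simp [twoMin, twoMinStep]
  rw [solutionAltLoop.eq_def]
  rw [h2]
  by_cases hK : a < K
  · simp [hK, not_le.mpr hK]
  · simp [hK, not_lt.mp hK]

-- both loops agree on multiset-equal states: each round extracts the two smallest values
theorem loop_eq : ∀ (N : Nat) (h xs : List Int) (K n : Int), h.length ≤ N →
    (↑h : Multiset Int) = ↑xs → solutionLoop h K n = solutionAltLoop xs K n := by
  intro N
  induction N with
  | zero =>
    intro h xs K n hlen hms
    have h0 : h = [] := List.length_eq_zero_iff.mp (Nat.le_zero.mp hlen)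
    subst h0
    have x0 : xs = [] := (List.perm_nil.mp (Multiset.coe_eq_coe.mp hms).symm)
    subst x0
    rw [loopA_nil, loopB_nil]
  | succ N ih =>
    intro h xs K n hlen hms
    rcases twoMin_cases xs with ⟨rfl, -⟩ | ⟨a, rfl, -⟩ | ⟨m1, m2, hm⟩
    · have h0 : h = [] := List.perm_nil.mp (Multiset.coe_eq_coe.mp hms)
      subst h0
      rw [loopA_nil, loopB_nil]
    · have h0 : h = [a] := List.perm_singleton.mp (Multiset.coe_eq_coe.mp hms)
      subst h0
      rw [loopA_single, loopB_single]
    · obtain ⟨huv, rest, hxs, hrest⟩ := twoMin_some2 hm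
      have hh : (↑h : Multiset Int) = m1 ::ₘ m2 ::ₘ rest := hms.trans hxs
      have hmin1 : h.min? = some m1 := by
        refine min?_of_multiset hh ?_
        intro r hr
        rcases Multiset.mem_cons.mp hr with h1 | h1
        · exact h1 ▸ huv
        · exact le_trans huv (hrest r h1)
      have hlen2 : h.length = Multiset.card rest + 2 := by
        have := congrArg Multiset.card hh
        simpa [Multiset.coe_card, Multiset.card_cons] using this
      have he1 : (↑(h.erase m1) : Multiset Int) = m2 ::ₘ rest := by
        rw [← Multiset.coe_erase, hh, Multiset.erase_cons_head]
      have hmin2 : (h.erase m1).min? = some m2 := min?_of_multiset he1 hrest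
      have he2 : (↑((h.erase m1).erase m2) : Multiset Int) = rest := by
        rw [← Multiset.coe_erase, he1, Multiset.erase_cons_head]
      have hx1 : (↑(xs.erase m1) : Multiset Int) = m2 ::ₘ rest := by
        rw [← Multiset.coe_erase, hxs, Multiset.erase_cons_head]
      have hx2 : (↑((xs.erase m1).erase m2) : Multiset Int) = rest := by
        rw [← Multiset.coe_erase, hx1, Multiset.erase_cons_head]
      have hp1 : pyHeapPop h = some (m1, h.erase m1) := by
        rw [pyHeapPop, hmin1]
      have hp2 : pyHeapPop (h.erase m1) = some (m2, (h.erase m1).erase m2) := by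
        rw [pyHeapPop, hmin2]
      have hne : ¬(h.length = 1 ∧ h.head! < K) := by
        rintro ⟨hl, -⟩; omega
      rw [solutionLoop.eq_def, if_neg hne, hp1]
      rw [solutionAltLoop.eq_def, hm]
      by_cases hK : m1 ≥ K
      · simp [hK]
      · simp only [if_neg hK]
        rw [hp2]
        apply ih
        · have := congrArg Multiset.card he2
          simp only [Multiset.coe_card] at this
          simp only [List.length_append, List.length_cons, List.length_nil]
          omega
        · have hperm : ((h.erase m1).erase m2).Perm ((xs.erase m1).erase m2) :=
            Multiset.coe_eq_coe.mp (he2.trans hx2.symm)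
          exact Multiset.coe_eq_coe.mpr (hperm.append_right [m1 + 2 * m2])

-- ===== VERDICT (by name: the statement is the Claim_ definition above) =====
theorem solution_spec : Claim_equal_solution := by
  intro scoville K _ _
  unfold Spec_solution solution solution_alt
  exact loop_eq scoville.length scoville scoville K 0 le_rfl rfl
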